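-- pv_equiv track=rewrite | github.com/ParitKansal/retail-vision-analytics-backend | backend/services/entry_exit_service/service.py | simplify_history
-- ===== SOURCE A (Python) =====
-- from typing import Dict, Optional, List, Tuple
--
-- def simplify_history(history: List[int]) -> Tuple[int]:
--     if not history:
--         return ()
--     converted = [h + 1 for h in history]
--     simplified = []
--     if converted:
--         simplified.append(converted[0])
--         for x in converted[1:]:
--             if x != simplified[-1]:
--                 simplified.append(x)
--     return tuple(simplified)
-- ===== SOURCE B (Python) =====
-- from typing import List, Tuple
--
-- def simplify_history(history: List[int]) -> Tuple[int]:
--     if not history: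
--         return ()
--
--     def solve(lo: int, hi: int) -> List[int]:
--         # deduped, incremented form of history[lo:hi] (hi - lo >= 1)
--         if hi - lo == 1:
--             return [history[lo] + 1]
--         mid = (lo + hi) // 2
--         left = solve(lo, mid)
--         right = solve(mid, hi)
--         if left[-1] == right[0]:
--             return left + right[1:]
--         return left + right
--
--     return tuple(solve(0, len(history)))
-- ===== Notes on version B (the rewrite author's own statement) =====
-- stated objective: alternative
-- what changed: B replaces A's single left-to-right scan with last-kept-element state by a divide-and-conquer: recursively simplify each half of the index range and merge the two results, dropping the right half's first element when it equals the left half's last; the +1 increment happens at the leaves.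
import Mathlib
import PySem

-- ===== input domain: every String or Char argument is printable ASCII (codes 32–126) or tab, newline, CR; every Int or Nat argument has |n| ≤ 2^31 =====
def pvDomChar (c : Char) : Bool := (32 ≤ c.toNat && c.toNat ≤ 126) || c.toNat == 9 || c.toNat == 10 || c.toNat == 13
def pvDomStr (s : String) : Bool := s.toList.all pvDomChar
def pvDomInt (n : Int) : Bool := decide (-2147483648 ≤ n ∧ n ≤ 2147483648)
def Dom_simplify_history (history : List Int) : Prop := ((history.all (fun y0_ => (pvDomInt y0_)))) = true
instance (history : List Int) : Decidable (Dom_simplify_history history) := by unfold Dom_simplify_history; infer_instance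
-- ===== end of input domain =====

-- B rebuilds A's increment-and-collapse-consecutive-duplicates result by divide and conquer over the
-- index range instead of A's single scan with mutable last-element state; same return value (alternative).

-- ===== PORT A =====
-- A: converted = [h+1 for h in history]; simplified = [converted[0]]; then for x in converted[1:]:
-- append x if x != the last kept element; the last-kept-element lookup is getLast? in the foldl below.
def simplify_history (history : List Int) : List Int :=
  if history = [] then []
  else
    let converted := history.map (fun h => h + 1)
    match converted with
    | [] => []
    | c :: rest =>
      rest.foldl (fun acc x => if some x ≠ acc.getLast? then acc ++ [x] else acc) [c]

-- ===== PORT B =====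
-- B's solve(lo, hi) works on the slice history[lo:hi]; the port passes that nonempty slice itself
-- (take/drop at the midpoint = the two index halves), step for step otherwise.
def pvMerge (left right : List Int) : List Int :=
  if left.getLast? = right.head? then left ++ right.tail else left ++ right

def pvSolve (xs : List Int) : List Int :=
  if _h : xs.length ≤ 1 then xs.map (fun h => h + 1)
  else pvMerge (pvSolve (xs.take (xs.length / 2))) (pvSolve (xs.drop (xs.length / 2)))
termination_by xs.length
decreasing_by
  · simp only [List.length_take]; omega
  · simp only [List.length_drop]; omega

def simplify_history_alt (history : List Int) : List Int :=
  if history = [] then [] else pvSolve history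

-- ===== PRECONDITION & SPEC =====
def Spec_simplify_history (history : List Int) (out : List Int) : Prop := out = simplify_history_alt history
instance (history : List Int) (out : List Int) : Decidable (Spec_simplify_history history out) := by unfold Spec_simplify_history; infer_instance

-- ===== CLAIM (what is proved, stated in full; the proofs are below) =====
def Claim_equal_simplify_history : Prop := ∀ (history : List Int), Dom_simplify_history history → Spec_simplify_history history (simplify_history history)

-- ===== LEMMAS AND PROOFS =====

-- keys of maximal runs of equal consecutive elements: the common specification both ports are reduced to
def pvGroupKeys : List Int → List Int
  | [] => []
  | [x] => [x]
  | x :: y :: rest => if x = y then pvGroupKeys (y :: rest) else x :: pvGroupKeys (y :: rest)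

-- tail of the dedup assuming the previous kept element is `a`
def pvAux (a : Int) : List Int → List Int
  | [] => []
  | x :: xs => if x = a then pvAux a xs else x :: pvAux x xs

theorem pvFoldl_eq_aux (xs : List Int) : ∀ (acc : List Int) (a : Int), acc.getLast? = some a →
    xs.foldl (fun acc x => if some x ≠ acc.getLast? then acc ++ [x] else acc) acc = acc ++ pvAux a xs := by
  induction xs with
  | nil => intro acc a _; simp [pvAux]
  | cons x xs ih =>
    intro acc a h
    simp only [List.foldl_cons, pvAux]
    by_cases hx : x = a
    · subst hx
      have hceq : ¬ (some x ≠ acc.getLast?) := by simp [h]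
      rw [if_neg hceq, if_pos rfl]
      exact ih acc x h
    · have hne : some x ≠ acc.getLast? := by rw [h]; simp [hx]
      rw [if_pos hne, if_neg hx, ih (acc ++ [x]) x (by simp)]
      simp

theorem pvGroupKeys_cons_eq (xs : List Int) : ∀ (x : Int), pvGroupKeys (x :: xs) = x :: pvAux x xs := by
  induction xs with
  | nil => intro x; simp [pvGroupKeys, pvAux]
  | cons y ys ih =>
    intro x
    simp only [pvGroupKeys, pvAux, ih y]
    by_cases h : x = y
    · subst h; simp
    · have h' : ¬ y = x := fun e => h e.symm
      simp [h, h']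

-- +1 is injective, so dedup-then-map = map-then-dedup on the tail
theorem pvAux_map (xs : List Int) : ∀ (a : Int), pvAux (a + 1) (xs.map (fun h => h + 1)) = (pvAux a xs).map (fun h => h + 1) := by
  induction xs with
  | nil => intro a; simp [pvAux]
  | cons x xs ih =>
    intro a
    simp only [List.map_cons, pvAux]
    by_cases h : x = a
    · simp [h, ih a]
    · have h1 : ¬ (x + 1 = a + 1) := by omega
      simp [h, h1, ih x]

-- A equals map (+1) of the run keys
theorem pvA_eq_keys (history : List Int) :
    simplify_history history = (pvGroupKeys history).map (fun h => h + 1) := by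
  unfold simplify_history
  cases history with
  | nil => simp [pvGroupKeys]
  | cons c rest =>
    simp only [List.map_cons]
    rw [if_neg (List.cons_ne_nil c rest)]
    rw [pvFoldl_eq_aux _ [c + 1] (c + 1) (by simp), pvGroupKeys_cons_eq, pvAux_map]
    simp

-- last element of the run keys
theorem pvGroupKeys_last (xs : List Int) (h : xs ≠ []) :
    (pvGroupKeys xs).getLast? = xs.getLast? := by
  induction xs with
  | nil => exact absurd rfl h
  | cons x t ih =>
    cases t with
    | nil => simp [pvGroupKeys]
    | cons y ys =>
      have ht : (y :: ys) ≠ [] := List.cons_ne_nil _ _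
      simp only [pvGroupKeys]
      by_cases hxy : x = y
      · rw [if_pos hxy, ih ht]; simp
      · rw [if_neg hxy, pvGroupKeys_cons_eq, List.getLast?_cons_cons,
          ← pvGroupKeys_cons_eq, ih ht, List.getLast?_cons_cons]

-- splitting the run keys of a concatenation
theorem pvGroupKeys_append (a : List Int) (ha : a ≠ []) (y : Int) (ys : List Int) :
    pvGroupKeys (a ++ y :: ys) =
      if a.getLast? = some y then pvGroupKeys a ++ (pvGroupKeys (y :: ys)).tail
      else pvGroupKeys a ++ pvGroupKeys (y :: ys) := by
  induction a with
  | nil => exact absurd rfl ha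
  | cons x t ih =>
    cases t with
    | nil =>
      simp only [List.singleton_append, pvGroupKeys, List.getLast?_singleton, Option.some.injEq]
      by_cases hxy : x = y
      · subst hxy
        rw [if_pos rfl, if_pos rfl, pvGroupKeys_cons_eq ys x]
        simp
      · rw [if_neg hxy, if_neg hxy]
    | cons z zs =>
      have ht : (z :: zs) ≠ [] := List.cons_ne_nil _ _
      have hlast : (x :: z :: zs).getLast? = (z :: zs).getLast? := by simp
      simp only [List.cons_append, pvGroupKeys] at *
      by_cases hxz : x = z
      · rw [if_pos hxz, if_pos hxz, ih ht, hlast]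
      · rw [if_neg hxz, if_neg hxz, ih ht, hlast]
        split_ifs <;> rfl

-- B's divide-and-conquer equals map (+1) of the run keys
theorem pvSolve_eq_keys (xs : List Int) (h : xs ≠ []) :
    pvSolve xs = (pvGroupKeys xs).map (fun h => h + 1) := by
  induction xs using pvSolve.induct with
  | case1 xs hle =>
    cases xs with
    | nil => exact absurd rfl h
    | cons x t =>
      cases t with
      | nil => simp [pvSolve, pvGroupKeys]
      | cons y ys => simp at hle
  | case2 xs hgt ihl ihr =>
    have hlen : 2 ≤ xs.length := by omega
    have hm1 : 1 ≤ xs.length / 2 := by omega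
    have hm2 : xs.length / 2 < xs.length := by omega
    have htk : xs.take (xs.length / 2) ≠ [] := by
      intro he; have := congrArg List.length he
      simp only [List.length_take, List.length_nil] at this; omega
    have hdr : xs.drop (xs.length / 2) ≠ [] := by
      intro he; have := congrArg List.length he
      simp only [List.length_drop, List.length_nil] at this; omega
    rw [pvSolve, dif_neg hgt]
    unfold pvMerge
    rw [ihl htk, ihr hdr]
    obtain ⟨y, ys, hys⟩ := List.exists_cons_of_ne_nil hdr
    have hsplit : xs = xs.take (xs.length / 2) ++ y :: ys := by
      rw [← hys, List.take_append_drop]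
    rw [hys]
    conv_rhs => rw [hsplit]
    rw [pvGroupKeys_append _ htk y ys]
    have hmaplast : ((pvGroupKeys (xs.take (xs.length / 2))).map (fun h => h + 1)).getLast? =
        ((pvGroupKeys (xs.take (xs.length / 2))).getLast?).map (fun h => h + 1) := by
      simp [List.getLast?_map]
    have hmaphead : ((pvGroupKeys (y :: ys)).map (fun h => h + 1)).head? = some (y + 1) := by
      rw [pvGroupKeys_cons_eq]; rfl
    rw [hmaplast, hmaphead, pvGroupKeys_last _ htk]
    by_cases hc : (xs.take (xs.length / 2)).getLast? = some y
    · rw [if_pos hc, if_pos (by rw [hc]; rfl)]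
      rw [List.map_append, List.map_tail]
    · rw [if_neg hc, if_neg ?_, List.map_append]
      intro he
      cases hg : (xs.take (xs.length / 2)).getLast? with
      | none => rw [hg] at he; simp at he
      | some v =>
        rw [hg] at he
        simp only [Option.map_some, Option.some.injEq] at he
        exact hc (by rw [hg]; exact congrArg some (by omega))

-- ===== VERDICT (by name: the statement is the Claim_ definition above) =====
theorem simplify_history_spec : Claim_equal_simplify_history := by
  intro history _
  unfold Spec_simplify_history simplify_history_alt
  rw [pvA_eq_keys]
  cases history with
  | nil => simp [pvGroupKeys]
  | cons c rest =>
    rw [if_neg (List.cons_ne_nil c rest), pvSolve_eq_keys _ (List.cons_ne_nil c rest)]
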